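-- pv_equiv track=rewrite | github.com/rjmille3/two_stage_reaction_prediction | rpCHEM/CombiCDB/OrbitalInteraction.py | reactionChangeCounts
-- ===== SOURCE A (Python) =====
-- def reactionChangeCounts(reactantSmiList, productSmiList):
--     """Returns a dictionary keyed by the reactant and product
--     SMILES strings lists provided.  Values equals the net change
--     to the component that the reaction represents (-1 for each
--     reactant occurence, +1 for each product occurence).
--     """
--     countDict = dict();
--
--     for smiles in reactantSmiList:
--         if smiles not in countDict:
--             countDict[smiles] = 0;
--         countDict[smiles] -= 1;
--
--     for smiles in productSmiList:
--         if smiles not in countDict: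
--             countDict[smiles] = 0;
--         countDict[smiles] += 1;
--
--     return countDict;
-- ===== SOURCE B (Python) =====
-- def reactionChangeCounts(reactantSmiList, productSmiList):
--     reactantCounts = {}
--     for smi in reactantSmiList:
--         reactantCounts[smi] = reactantCounts.get(smi, 0) + 1
--     productCounts = {}
--     for smi in productSmiList:
--         productCounts[smi] = productCounts.get(smi, 0) + 1
--     return {smi: productCounts.get(smi, 0) - reactantCounts.get(smi, 0)
--             for smi in dict.fromkeys(reactantSmiList + productSmiList)}
-- ===== Notes on version B (the rewrite author's own statement) =====
-- stated objective: alternative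
-- what changed: Instead of accumulating net changes in one dict across both loops, B builds two separate frequency tables (reactant counts, product counts) and then produces the result in a distinct merge pass: a comprehension over the ordered-deduplicated union of keys taking productCount - reactantCount.
import Mathlib
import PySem

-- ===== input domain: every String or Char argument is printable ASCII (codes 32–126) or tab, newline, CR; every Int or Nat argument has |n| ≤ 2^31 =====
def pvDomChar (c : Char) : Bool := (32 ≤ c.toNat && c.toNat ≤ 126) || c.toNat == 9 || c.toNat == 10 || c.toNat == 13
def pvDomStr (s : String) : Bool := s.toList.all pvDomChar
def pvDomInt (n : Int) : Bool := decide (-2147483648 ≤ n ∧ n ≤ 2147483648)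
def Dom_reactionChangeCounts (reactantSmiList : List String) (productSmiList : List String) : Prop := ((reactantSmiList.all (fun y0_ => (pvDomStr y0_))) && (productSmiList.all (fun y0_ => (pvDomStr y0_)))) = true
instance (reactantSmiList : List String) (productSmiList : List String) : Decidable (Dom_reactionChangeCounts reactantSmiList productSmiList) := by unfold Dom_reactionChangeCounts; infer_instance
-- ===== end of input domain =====

-- B builds two separate frequency tables and merges them in a distinct pass over the
-- ordered-deduplicated union of the keys (objective: alternative decomposition).

-- ===== PORT A =====
def reactionChangeCounts (reactantSmiList : List String) (productSmiList : List String) : List (String × Int) :=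
  let countDict : PySem.Dict String Int := PySem.Dict.empty
  let countDict := reactantSmiList.foldl (fun countDict smiles =>
      let countDict := if countDict.contains smiles = false then countDict.insert smiles 0 else countDict
      countDict.insert smiles (countDict.getD smiles 0 - 1)) countDict
  let countDict := productSmiList.foldl (fun countDict smiles =>
      let countDict := if countDict.contains smiles = false then countDict.insert smiles 0 else countDict
      countDict.insert smiles (countDict.getD smiles 0 + 1)) countDict
  countDict.items

-- ===== PORT B =====
def reactionChangeCounts_alt (reactantSmiList : List String) (productSmiList : List String) : List (String × Int) :=
  let reactantCounts : PySem.Dict String Int :=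
    reactantSmiList.foldl (fun d smi => d.insert smi (d.getD smi 0 + 1)) PySem.Dict.empty
  let productCounts : PySem.Dict String Int :=
    productSmiList.foldl (fun d smi => d.insert smi (d.getD smi 0 + 1)) PySem.Dict.empty
  (PySem.List.dedup (reactantSmiList ++ productSmiList)).map
    (fun smi => (smi, productCounts.getD smi 0 - reactantCounts.getD smi 0))

-- ===== PRECONDITION & SPEC =====
def Spec_reactionChangeCounts (reactantSmiList : List String) (productSmiList : List String) (out : List (String × Int)) : Prop := out = reactionChangeCounts_alt reactantSmiList productSmiList
instance (reactantSmiList : List String) (productSmiList : List String) (out : List (String × Int)) : Decidable (Spec_reactionChangeCounts reactantSmiList productSmiList out) := by unfold Spec_reactionChangeCounts; infer_instance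

-- ===== CLAIM (what is proved, stated in full; the proofs are below) =====
def Claim_equal_reactionChangeCounts : Prop := ∀ (reactantSmiList : List String) (productSmiList : List String), Dom_reactionChangeCounts reactantSmiList productSmiList → Spec_reactionChangeCounts reactantSmiList productSmiList (reactionChangeCounts reactantSmiList productSmiList)

-- ===== LEMMAS AND PROOFS =====

-- A's loop body ('setdefault 0 then add c') equals a single Dict.modify.
theorem pv_step_eq_modify (d : PySem.Dict String Int) (s : String) (f : Int → Int) :
    (let d' := if d.contains s = false then d.insert s 0 else d
     d'.insert s (f (d'.getD s 0))) = d.modify s 0 f := by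
  by_cases h : d.contains s = true
  · simp [h, PySem.Dict.modify]
  · simp only [Bool.not_eq_true] at h
    simp [h, PySem.Dict.modify, PySem.Dict.getD_insert_self, PySem.Dict.insert_insert_self,
      PySem.Dict.getD_of_not_contains d 0 h]

theorem pv_foldA (l : List String) (d : PySem.Dict String Int) :
    l.foldl (fun countDict smiles =>
      let countDict := if countDict.contains smiles = false then countDict.insert smiles 0 else countDict
      countDict.insert smiles (countDict.getD smiles 0 - 1)) d
    = l.foldl (fun d s => d.modify s 0 (· - 1)) d := by
  induction l generalizing d with
  | nil => rfl
  | cons x xs ih => simp only [List.foldl_cons, pv_step_eq_modify d x (· - 1)]; exact ih _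

theorem pv_foldB (l : List String) (d : PySem.Dict String Int) :
    l.foldl (fun countDict smiles =>
      let countDict := if countDict.contains smiles = false then countDict.insert smiles 0 else countDict
      countDict.insert smiles (countDict.getD smiles 0 + 1)) d
    = l.foldl (fun d s => d.modify s 0 (· + 1)) d := by
  induction l generalizing d with
  | nil => rfl
  | cons x xs ih => simp only [List.foldl_cons, pv_step_eq_modify d x (· + 1)]; exact ih _

-- value of such a fold: each occurrence of v adds c
theorem pv_getD_fold (f : Int → Int) (c : Int) (hf : ∀ v, f v = v + c)
    (l : List String) (d : PySem.Dict String Int) (v : String) :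
    (l.foldl (fun d s => d.modify s 0 f) d).getD v 0 = d.getD v 0 + c * l.count v := by
  induction l generalizing d with
  | nil => simp
  | cons x xs ih =>
      simp only [List.foldl_cons, ih, PySem.Dict.getD_modify, List.count_cons]
      by_cases h : v = x
      · subst h; simp [hf]; ring
      · simp [h, Ne.symm h]

theorem pv_keys_fold (f : Int → Int) (l : List String) (d : PySem.Dict String Int) :
    (l.foldl (fun d s => d.modify s 0 f) d).keys = PySem.Set.update d.keys l :=
  PySem.Dict.keys_foldl_modify l 0 (fun _ _ => f) d

theorem pv_main (reactantSmiList productSmiList : List String) :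
    (productSmiList.foldl (fun (d : PySem.Dict String Int) s => d.modify s 0 (· + 1))
      (reactantSmiList.foldl (fun (d : PySem.Dict String Int) s => d.modify s 0 (· - 1))
        PySem.Dict.empty)).items
    = reactionChangeCounts_alt reactantSmiList productSmiList := by
  have hnd : (productSmiList.foldl (fun (d : PySem.Dict String Int) s => d.modify s 0 (· + 1))
      (reactantSmiList.foldl (fun (d : PySem.Dict String Int) s => d.modify s 0 (· - 1))
        PySem.Dict.empty)).keys.Nodup := by
    rw [pv_keys_fold, pv_keys_fold]
    apply PySem.Set.nodup_update
    apply PySem.Set.nodup_update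
    simp [PySem.Dict.keys_empty]
  rw [PySem.Dict.items_eq_map_keys _ hnd 0]
  have hkeys : (productSmiList.foldl (fun (d : PySem.Dict String Int) s => d.modify s 0 (· + 1))
      (reactantSmiList.foldl (fun (d : PySem.Dict String Int) s => d.modify s 0 (· - 1))
        PySem.Dict.empty)).keys = PySem.Set.ofList (reactantSmiList ++ productSmiList) := by
    rw [pv_keys_fold, pv_keys_fold]
    simp [PySem.Dict.keys_empty, PySem.Set.ofList_eq_foldl, PySem.Set.update, List.foldl_append]
  rw [hkeys]
  unfold reactionChangeCounts_alt
  rw [PySem.List.dedup_eq_ofList]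
  apply List.map_congr_left
  intro k _
  rw [pv_getD_fold (· + 1) 1 (fun v => rfl), pv_getD_fold (· - 1) (-1) (fun v => sub_eq_add_neg v 1)]
  rw [PySem.Dict.getD_foldl_insert_add_one, PySem.Dict.getD_foldl_insert_add_one]
  simp [PySem.Dict.getD_empty]
  ring

-- ===== VERDICT (by name: the statement is the Claim_ definition above) =====
theorem reactionChangeCounts_spec : Claim_equal_reactionChangeCounts := by
  intro r p _
  show reactionChangeCounts r p = reactionChangeCounts_alt r p
  unfold reactionChangeCounts
  dsimp only
  rw [pv_foldA, pv_foldB, pv_main]
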